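-- pv_equiv track=rewrite | github.com/ErliCai/Leetcode | Leetcode_Problems/Leetcode438.py | subDic
-- ===== SOURCE A (Python) =====
-- def subDic(dic1, dic2):
--
--     keyCheck = dic1.keys() <= dic2.keys()
--     if not keyCheck:
--         return keyCheck
--     freqCheck = True
--     for key in dic1:
--         if dic1[key] > dic2[key]:
--             freqCheck = False
--
--     return freqCheck
-- ===== SOURCE B (Python) =====
-- def subDic(dic1, dic2):
--     for key in dic1:
--         if key not in dic2 or dic1[key] > dic2[key]:
--             return False
--     return True
-- ===== Notes on version B (the rewrite author's own statement) =====
-- stated objective: simpler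
-- what changed: Fuses A's separate key-subset set comparison and its non-short-circuiting frequency loop into one early-returning loop over dic1 that checks membership and count together per key.
import Mathlib
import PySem

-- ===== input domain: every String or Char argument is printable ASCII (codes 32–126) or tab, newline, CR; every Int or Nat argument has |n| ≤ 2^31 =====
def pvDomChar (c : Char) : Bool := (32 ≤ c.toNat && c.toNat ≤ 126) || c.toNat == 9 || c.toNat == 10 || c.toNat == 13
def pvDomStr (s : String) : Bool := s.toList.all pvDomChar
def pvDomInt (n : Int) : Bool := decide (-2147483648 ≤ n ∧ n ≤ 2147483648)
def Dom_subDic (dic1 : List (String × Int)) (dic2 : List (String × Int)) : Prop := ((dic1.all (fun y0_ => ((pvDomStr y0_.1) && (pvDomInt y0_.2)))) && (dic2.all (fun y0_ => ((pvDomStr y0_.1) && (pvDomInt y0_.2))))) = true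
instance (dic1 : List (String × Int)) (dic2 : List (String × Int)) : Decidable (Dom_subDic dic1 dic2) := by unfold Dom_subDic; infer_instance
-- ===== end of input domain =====

-- B fuses A's separate key-subset check and non-short-circuiting frequency loop into one
-- early-returning pass over dic1 (objective: simpler).

-- ===== PORT A =====
-- keyCheck = dic1.keys() <= dic2.keys(); if not keyCheck: return keyCheck;
-- then a second loop setting freqCheck = False on any dic1[key] > dic2[key].
def subDic (dic1 : List (String × Int)) (dic2 : List (String × Int)) : Bool :=
  let d1 := PySem.Dict.ofList dic1
  let d2 := PySem.Dict.ofList dic2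
  let keyCheck := (PySem.Dict.keys d1).all (fun k => PySem.Dict.contains d2 k)
  if !keyCheck then keyCheck
  else
    (PySem.Dict.keys d1).foldl
      (fun freqCheck key =>
        if PySem.Dict.getD d1 key 0 > PySem.Dict.getD d2 key 0 then false else freqCheck)
      true

-- ===== PORT B =====
-- for key in dic1: if key not in dic2 or dic1[key] > dic2[key]: return False; return True
def subDicLoop (d1 : PySem.Dict String Int) (d2 : PySem.Dict String Int) : List String → Bool
  | [] => true
  | key :: ks =>
    if !(PySem.Dict.contains d2 key) || PySem.Dict.getD d1 key 0 > PySem.Dict.getD d2 key 0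
    then false
    else subDicLoop d1 d2 ks

def subDic_alt (dic1 : List (String × Int)) (dic2 : List (String × Int)) : Bool :=
  let d1 := PySem.Dict.ofList dic1
  let d2 := PySem.Dict.ofList dic2
  subDicLoop d1 d2 (PySem.Dict.keys d1)

-- ===== PRECONDITION & SPEC =====
def Spec_subDic (dic1 : List (String × Int)) (dic2 : List (String × Int)) (out : Bool) : Prop := out = subDic_alt dic1 dic2
instance (dic1 : List (String × Int)) (dic2 : List (String × Int)) (out : Bool) : Decidable (Spec_subDic dic1 dic2 out) := by unfold Spec_subDic; infer_instance

-- ===== CLAIM (what is proved, stated in full; the proofs are below) =====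
def Claim_equal_subDic : Prop := ∀ (dic1 : List (String × Int)) (dic2 : List (String × Int)), Dom_subDic dic1 dic2 → Spec_subDic dic1 dic2 (subDic dic1 dic2)

-- ===== LEMMAS AND PROOFS =====

-- B's early-return loop computes 'every key is present with a small enough count'.
theorem subDicLoop_eq_all (d1 d2 : PySem.Dict String Int) (ks : List String) :
    subDicLoop d1 d2 ks
      = ks.all (fun k => PySem.Dict.contains d2 k
          && !(decide (PySem.Dict.getD d1 k 0 > PySem.Dict.getD d2 k 0))) := by
  induction ks with
  | nil => rfl
  | cons k ks ih =>
    simp only [subDicLoop, List.all_cons, ih]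
    by_cases h1 : PySem.Dict.contains d2 k <;>
      by_cases h2 : PySem.Dict.getD d1 k 0 > PySem.Dict.getD d2 k 0 <;>
      simp [h1, h2]

-- A's second loop is the conjunction of the per-key count comparisons.
theorem foldl_freq_eq_all (d1 d2 : PySem.Dict String Int) (ks : List String) (b : Bool) :
    ks.foldl (fun freqCheck key =>
        if PySem.Dict.getD d1 key 0 > PySem.Dict.getD d2 key 0 then false else freqCheck) b
      = (b && ks.all (fun k => !(decide (PySem.Dict.getD d1 k 0 > PySem.Dict.getD d2 k 0)))) := by
  induction ks generalizing b with
  | nil => simp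
  | cons k ks ih =>
    simp only [List.foldl_cons, List.all_cons, ih]
    by_cases h : PySem.Dict.getD d1 k 0 > PySem.Dict.getD d2 k 0
    · simp [h]
    · simp [h]

-- all distributes over a pointwise && .
theorem all_and_distrib {α : Type} (l : List α) (f g : α → Bool) :
    l.all (fun k => f k && g k) = (l.all f && l.all g) := by
  induction l with
  | nil => rfl
  | cons x xs ih =>
    simp only [List.all_cons, ih]
    cases f x <;> cases g x <;> cases xs.all f <;> simp

-- ===== VERDICT (by name: the statement is the Claim_ definition above) =====
theorem subDic_spec : Claim_equal_subDic := by
  intro dic1 dic2 _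
  show subDic dic1 dic2 = subDic_alt dic1 dic2
  simp only [subDic, subDic_alt, subDicLoop_eq_all, foldl_freq_eq_all, all_and_distrib]
  by_cases h : (PySem.Dict.keys (PySem.Dict.ofList dic1)).all
      (fun k => PySem.Dict.contains (PySem.Dict.ofList dic2) k) <;> simp [h]
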